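-- pv_equiv track=rewrite | github.com/ShyLoon/Pract2 | Pr2.py | AmountDays
-- ===== SOURCE A (Python) =====
-- def AmountDays(year):
--     january = 31
--     if (year % 4 == 0):
--         february = 29
--     else: february = 28
--     march = 31
--     april = 30
--     may = 31
--     june = 30
--     july = 31
--     august = 31
--     september = 30
--     october = 31
--     november = 30
--     december = 31
--
--     months = [january, february, march, april, may, june, july, august, september, october, november, december]
--     itog = 0
--     for i in range(len(months)):
--         itog += summa(months[i])
--     return itog
--
-- def summa(month):
--     i = 1
--     month += 1
--     itog = 0
--     for i in range(month):
--         if (month < 10):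
--             itog += i
--         else: itog += (i // 10) + (i % 10)
--     return itog
-- ===== SOURCE B (Python) =====
-- def AmountDays(year):
--     cum = [0]
--     for i in range(1, 32):
--         cum.append(cum[-1] + i // 10 + i % 10)
--     feb = 29 if year % 4 == 0 else 28
--     return 7 * cum[31] + 4 * cum[30] + cum[feb]
-- ===== Notes on version B (the rewrite author's own statement) =====
-- stated objective: simpler
-- what changed: Replaces the 12-month outer loop that recomputes a per-month digit-sum scan with one cumulative digit-sum table up to 31 combined as 7*cum[31]+4*cum[30]+cum[feb] using month-length multiplicities.
import Mathlib
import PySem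

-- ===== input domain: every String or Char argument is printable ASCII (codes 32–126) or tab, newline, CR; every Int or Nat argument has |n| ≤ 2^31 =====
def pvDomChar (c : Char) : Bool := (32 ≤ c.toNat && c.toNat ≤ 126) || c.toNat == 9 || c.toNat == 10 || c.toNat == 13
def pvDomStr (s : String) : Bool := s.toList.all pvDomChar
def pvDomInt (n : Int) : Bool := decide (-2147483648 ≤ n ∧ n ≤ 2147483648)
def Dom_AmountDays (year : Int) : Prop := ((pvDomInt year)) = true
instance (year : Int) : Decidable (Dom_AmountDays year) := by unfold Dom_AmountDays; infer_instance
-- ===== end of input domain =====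

-- B replaces the 12-month loop of per-month digit-sum scans by one cumulative
-- digit-sum table to 31 combined with month-length multiplicities (simpler decomposition).


-- ===== PORT A =====
-- summa(month): for i in range(month+1): add i (if month+1<10) else digit sum of i
def summa (month : Int) : Int :=
  let month := month + 1
  (PySem.List.pyRange 0 month 1).foldl
    (fun itog i =>
      if month < 10 then itog + i
      else itog + PySem.Int.floordiv i 10 + PySem.Int.mod i 10) 0

def AmountDays (year : Int) : Int :=
  let february : Int := if PySem.Int.mod year 4 = 0 then 29 else 28
  let months : List Int := [31, february, 31, 30, 31, 30, 31, 31, 30, 31, 30, 31]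
  (PySem.List.pyRange 0 (PySem.List.len months) 1).foldl
    (fun itog i => itog + summa (PySem.List.pyGetD months i 0)) 0

-- ===== PORT B =====
def AmountDays_alt (year : Int) : Int :=
  let cum : List Int :=
    (PySem.List.pyRange 1 32 1).foldl
      (fun cum i => cum ++ [PySem.List.pyGetD cum (-1) 0 + PySem.Int.floordiv i 10 + PySem.Int.mod i 10])
      [0]
  let feb : Int := if PySem.Int.mod year 4 = 0 then 29 else 28
  7 * PySem.List.pyGetD cum 31 0 + 4 * PySem.List.pyGetD cum 30 0 + PySem.List.pyGetD cum feb 0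

-- ===== PRECONDITION & SPEC =====
def Spec_AmountDays (year : Int) (out : Int) : Prop := out = AmountDays_alt year
instance (year : Int) (out : Int) : Decidable (Spec_AmountDays year out) := by unfold Spec_AmountDays; infer_instance

-- ===== CLAIM (what is proved, stated in full; the proofs are below) =====
def Claim_equal_AmountDays : Prop := ∀ (year : Int), Dom_AmountDays year → Spec_AmountDays year (AmountDays year)

-- ===== LEMMAS AND PROOFS =====
theorem AmountDays_cases (year : Int) :
    AmountDays year = AmountDays_alt year := by
  by_cases h : PySem.Int.mod year 4 = 0 <;>
    simp only [AmountDays, AmountDays_alt, if_pos, h] <;> decide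

-- ===== VERDICT (by name: the statement is the Claim_ definition above) =====
theorem AmountDays_spec : Claim_equal_AmountDays := by
  intro year _
  exact AmountDays_cases year
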